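-- pv_equiv track=rewrite | github.com/mjmcandrew/Coursera_2020 | Bioinformatics1_Spring2020/Func_GreedyMotifSearchWithPseudocounts.py | MotifConsensus
-- ===== SOURCE A (Python) =====
-- def MotifCountWithPseudocounts(Motifs):
--     motif_number = len(Motifs)
--     #Determines the number of motifs being analyzed.
--     motif_length = len(Motifs[0])
--     #Determines the motif_length based on the length of the first motif.
--     count = {}
--     #Creates an empty dictionary count that will store the answer.
--     for symbol in "ACGT":
--         count[symbol] = []
--         #Assigns keys to "A", "C", "G", and "T" with empty list as values.
--         for index in range(motif_length):
--              count[symbol].append(1)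
--              #Assigns a placeholder one (for pseudocount) to each index corresponding to the
--              #length of the motifs analyzed.
--     for character in range(motif_number):
--         #Refers to the position of a string in a list of strings. E.g. for a
--         #list of strings "AAA" "AAG" "AAT", "AAA" would have the character
--         #(index) 0, and the for loop below would then iterate through the
--         #string "AAA". After that, the character (index) would change to 1, and
--         #the for loop below would iterate through the string "AAG".
--         for index in range(motif_length):
--             #Refers to the position within the string. So for the first string,
--             #this would iterate through position 0, 1, and 2. But you need to
--             #assign a variable to actually pick up the string this refers to.
--             symbol = Motifs[character][index]
--             #Calls the specific letter in the string corresponding to that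
--             #string (with character) and position (index).
--             count[symbol][index] += 1
--             #Calls the dictionary count with symbol "A" "C" "G" or "T" assigned
--             #above as the key and increases the value stored within the list
--             #at that index position by 1.
--     return count
--
-- def MotifConsensus(Motifs):
--     kmer_length = len(Motifs[0])
--     #Determines the kmer_length based on the length of the first kmer.
--     counts = MotifCountWithPseudocounts(Motifs)
--     #Runs MotifCount on the motifs being analyzed to determine the nucleotide
--     #count at each position of each motif. These values will be used to
--     #determine the most frequent nucleotide at each position in order
--     #to find the consensus motif.
--     consensus = ""
--     #Creates an empty string consensus which will be added to with the
--     #nucleotide appearing most frequently in each column.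
--     for index in range(kmer_length):
--         #Iterates through the indices of each kmer.
--         max = 0
--         #Sets the maximum value for each column at 0. This value will be replaced
--         #with the first nonzero number encountered in the counts.
--         frequentSymbol = ""
--         #Initializes a string "frequentsymbol" which will be replaced with the
--         #most frequent nucleotide at each position as a function of m.
--         for nucleotide in "ACGT":
--             #Iterates through the keys of the dictionary counts.
--             if counts[nucleotide][index] > max:
--                 #Determines whether the count of a nucleotide at a specific
--                 #position is greater than the max. Since the max is set to zero
--                 #at the beginning of each iteration, this will be replaced by
--                 #the first non-zero number encountered, and subsequently by
--                 #any count greater than the stored value.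
--                 max = counts[nucleotide][index]
--                 #Replaces the variable max with a count higher than the one
--                 #currently stored in max if applicable.
--                 frequentSymbol = nucleotide
--                 #Assigns the nucleotide associated with the maximum count to the
--                 #variable "frequentSymbol".
--         consensus += frequentSymbol
--         #Adds the nucleotide with the greatest count after iteration to the string
--         #'consensus', which is returned as the final product.
--     return consensus
-- ===== SOURCE B (Python) =====
-- def MotifConsensus(Motifs):
--     res = []
--     for j in range(len(Motifs[0])):
--         tally = [0, 0, 0, 0]
--         for m in Motifs:
--             tally["ACGT".index(m[j])] += 1
--         res.append("ACGT"[tally.index(max(tally))])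
--     return "".join(res)
-- ===== Notes on version B (the rewrite author's own statement) =====
-- stated objective: simpler
-- what changed: B replaces A's dict-of-lists pseudocount matrix and strict-comparison max scan by a per-column integer tally list indexed via 'ACGT'.index, dropping the pseudocounts (a uniform +1 never changes the argmax) and selecting with 'ACGT'[tally.index(max(tally))].
import Mathlib
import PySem

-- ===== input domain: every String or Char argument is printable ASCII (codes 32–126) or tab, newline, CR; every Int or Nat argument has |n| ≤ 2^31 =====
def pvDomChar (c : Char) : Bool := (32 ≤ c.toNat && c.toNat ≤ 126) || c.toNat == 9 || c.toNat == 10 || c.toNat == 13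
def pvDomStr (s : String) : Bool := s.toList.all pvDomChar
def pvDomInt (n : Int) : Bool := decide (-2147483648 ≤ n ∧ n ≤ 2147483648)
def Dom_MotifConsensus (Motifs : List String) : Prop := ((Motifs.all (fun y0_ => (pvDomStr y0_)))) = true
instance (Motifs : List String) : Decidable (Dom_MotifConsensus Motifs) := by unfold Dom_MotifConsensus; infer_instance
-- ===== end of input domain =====

-- B drops A's dict-of-lists pseudocount matrix and strict-max scan: per column it fills a plain
-- integer tally list via "ACGT".index (no pseudocounts — a uniform +1 never changes the argmax)
-- and selects "ACGT"[tally.index(max(tally))]. Chosen for simplicity, not speed.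

-- ===== PORT A =====
-- Helper of A: the pseudocount matrix (dict 'A'/'C'/'G'/'T' → list of per-column counts).
-- 'count[symbol][index] += 1' is ported by hand as Dict.modify + List.set/List.getD: exact whenever
-- symbol is a key of the dict and index is in range (Python raises KeyError/IndexError otherwise; outside Pre_).
def MotifCountWithPseudocounts (Motifs : List String) : PySem.Dict Char (List Int) :=
  match PySem.List.pyGet? Motifs 0 with
  | none => PySem.Dict.empty   -- Python: IndexError on Motifs[0]; outside Pre_
  | some m0 =>
    let motif_number : Int := Motifs.length
    let motif_length : Int := PySem.Str.len m0
    let count := List.foldl (fun (d : PySem.Dict Char (List Int)) symbol =>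
        d.insert symbol (List.foldl (fun l (_ : Int) => l ++ [(1 : Int)]) []
          (PySem.List.pyRange 0 motif_length 1)))
      PySem.Dict.empty "ACGT".toList
    List.foldl (fun d character =>
      List.foldl (fun d index =>
        match PySem.List.pyGet? Motifs character with
        | none => d   -- unreachable: character < len(Motifs)
        | some s =>
          match PySem.Str.pyGet? s index with
          | none => d   -- Python: IndexError; outside Pre_
          | some symbol =>
            d.modify symbol [] (fun l => l.set index.toNat (l.getD index.toNat 0 + 1)))
        d (PySem.List.pyRange 0 motif_length 1))
      count (PySem.List.pyRange 0 motif_number 1)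

def MotifConsensus (Motifs : List String) : String :=
  match PySem.List.pyGet? Motifs 0 with
  | none => ""   -- Python: IndexError on Motifs[0]; outside Pre_
  | some m0 =>
    let kmer_length : Int := PySem.Str.len m0
    let counts := MotifCountWithPseudocounts Motifs
    let consensus := List.foldl (fun (consensus : List Char) index =>
        let p := List.foldl (fun (p : Int × List Char) nucleotide =>
            if PySem.List.pyGetD (counts.getD nucleotide []) index 0 > p.1 then
              (PySem.List.pyGetD (counts.getD nucleotide []) index 0, [nucleotide])
            else p)
          ((0 : Int), ([] : List Char)) "ACGT".toList
        consensus ++ p.2)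
      ([] : List Char) (PySem.List.pyRange 0 kmer_length 1)
    String.ofList consensus

-- ===== PORT B =====
def MotifConsensus_alt (Motifs : List String) : String :=
  match PySem.List.pyGet? Motifs 0 with
  | none => ""   -- Python: IndexError on Motifs[0] (inside len); outside Pre_
  | some m0 =>
    let res := List.foldl (fun (res : List Char) j =>
        let tally := List.foldl (fun (tally : List Int) m =>
            match PySem.Str.pyGet? m j with
            | none => tally   -- Python: IndexError on m[j]; outside Pre_
            | some ch =>
              match PySem.List.index? "ACGT".toList ch with
              | none => tally   -- Python: ValueError from "ACGT".index; outside Pre_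
              | some i => tally.set i (tally.getD i 0 + 1))
          [0, 0, 0, 0] Motifs
        match PySem.List.max? tally (fun x => x) with
        | none => res   -- unreachable: tally has four entries
        | some mx =>
          match PySem.List.index? tally mx with
          | none => res   -- unreachable: mx is an entry of tally
          | some i =>
            match PySem.Str.pyGet? "ACGT" (i : Int) with
            | none => res   -- unreachable: 0 ≤ i < 4
            | some ch => res ++ [ch])
      ([] : List Char) (PySem.List.pyRange 0 (PySem.Str.len m0) 1)
    String.ofList res

-- ===== PRECONDITION & SPEC =====
-- Pre_ excludes exactly the inputs on which A raises: the empty list (IndexError on Motifs[0]),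
-- a motif shorter than the first one (IndexError), and a non-ACGT character among the first
-- len(Motifs[0]) characters of any motif (KeyError).
def Pre_MotifConsensus (Motifs : List String) : Prop :=
  Motifs ≠ [] ∧ ∀ s ∈ Motifs,
    (Motifs.headD "").toList.length ≤ s.toList.length ∧
    ∀ i < (Motifs.headD "").toList.length, s.toList.getD i 'X' ∈ (['A', 'C', 'G', 'T'] : List Char)
instance (Motifs : List String) : Decidable (Pre_MotifConsensus Motifs) := by
  unfold Pre_MotifConsensus; infer_instance

def pvWitness_MotifConsensus : List String := ["ACG", "TCG"]

def Spec_MotifConsensus (Motifs : List String) (out : String) : Prop := out = MotifConsensus_alt Motifs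
instance (Motifs : List String) (out : String) : Decidable (Spec_MotifConsensus Motifs out) := by
  unfold Spec_MotifConsensus; infer_instance

-- ===== CLAIM (what is proved, stated in full; the proofs are below) =====
def Claim_equal_MotifConsensus : Prop := ∀ (Motifs : List String), Dom_MotifConsensus Motifs → Pre_MotifConsensus Motifs → Spec_MotifConsensus Motifs (MotifConsensus Motifs)

-- ===== LEMMAS AND PROOFS =====

-- the column-i character of a motif, as both ports read it inside Pre_
def pvCharAt (s : String) (i : Nat) : Char := s.toList.getD i 'X'

-- one update step of A's inner (index) loop over motif s
def pvStepA (s : String) (d : PySem.Dict Char (List Int)) (index : Int) : PySem.Dict Char (List Int) :=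
  match PySem.Str.pyGet? s index with
  | none => d
  | some symbol => d.modify symbol [] (fun l => l.set index.toNat (l.getD index.toNat 0 + 1))

-- a motif usable for the first K columns
def pvGood (K : Nat) (s : String) : Prop :=
  K ≤ s.toList.length ∧ ∀ i < K, pvCharAt s i ∈ (['A', 'C', 'G', 'T'] : List Char)

-- the plain count of nucleotide n in column i
def pvCnt (Motifs : List String) (i : Nat) (n : Char) : Int :=
  (List.count n (Motifs.map (fun s => pvCharAt s i)) : Int)

-- the pseudocount of nucleotide n in column i (what A's matrix holds)
def pvColCount (Motifs : List String) (i : Nat) (n : Char) : Int :=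
  1 + pvCnt Motifs i n

theorem pv_str_pyGet?_nat (s : String) (i : Nat) (h : i < s.toList.length) :
    PySem.Str.pyGet? s (i : Int) = some (pvCharAt s i) := by
  have h' : i < s.length := by rw [← String.length_toList]; exact h
  simp [PySem.Str.pyGet?, PySem.Chars.pyGet?, PySem.List.pyGet?, PySem.List.pyIdx?, h', pvCharAt,
    List.getD]

theorem pv_list_pyGet?_nat (xs : List String) (i : Nat) (h : i < xs.length) :
    PySem.List.pyGet? xs (i : Int) = some (xs.getD i "") := by
  simp [PySem.List.pyGet?, PySem.List.pyIdx?, h, List.getD]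

theorem pv_init {ν : Type} (v dflt : ν) (n : Char) (hn : n ∈ (['A', 'C', 'G', 'T'] : List Char)) :
    (List.foldl (fun (d : PySem.Dict Char ν) c => d.insert c v) PySem.Dict.empty
      ['A', 'C', 'G', 'T']).getD n dflt = v := by
  fin_cases hn
  · rw [List.foldl_cons, List.foldl_cons, List.foldl_cons, List.foldl_cons, List.foldl_nil,
      PySem.Dict.getD_insert_of_ne, PySem.Dict.getD_insert_of_ne, PySem.Dict.getD_insert_of_ne,
      PySem.Dict.getD_insert_self] <;> decide
  · rw [List.foldl_cons, List.foldl_cons, List.foldl_cons, List.foldl_cons, List.foldl_nil,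
      PySem.Dict.getD_insert_of_ne, PySem.Dict.getD_insert_of_ne,
      PySem.Dict.getD_insert_self] <;> decide
  · rw [List.foldl_cons, List.foldl_cons, List.foldl_cons, List.foldl_cons, List.foldl_nil,
      PySem.Dict.getD_insert_of_ne, PySem.Dict.getD_insert_self] <;> decide
  · rw [List.foldl_cons, List.foldl_cons, List.foldl_cons, List.foldl_cons, List.foldl_nil,
      PySem.Dict.getD_insert_self]

theorem pv_inner' (K : Nat) (s : String) (hs : pvGood K s) :
    ∀ (fuel a : Nat), K - a ≤ fuel → ∀ (d : PySem.Dict Char (List Int)),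
    (∀ n ∈ (['A', 'C', 'G', 'T'] : List Char), (d.getD n []).length = K) →
    ∀ n ∈ (['A', 'C', 'G', 'T'] : List Char),
      ((List.foldl (pvStepA s) d (PySem.List.pyRange (a : Int) (K : Int) 1)).getD n []).length = K ∧
      ∀ i < K, ((List.foldl (pvStepA s) d (PySem.List.pyRange (a : Int) (K : Int) 1)).getD n []).getD i 0
        = (d.getD n []).getD i 0 + (if a ≤ i ∧ pvCharAt s i = n then 1 else 0) := by
  intro fuel
  induction fuel with
  | zero =>
    intro a ha d hlen n hn
    have hKa : K ≤ a := by omega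
    rw [PySem.List.pyRange_one_eq_nil (by exact_mod_cast hKa)]
    refine ⟨hlen n hn, ?_⟩
    intro i hi
    have hni : ¬ (a ≤ i ∧ pvCharAt s i = n) := fun hh => by omega
    simp [hni]
  | succ fuel ih =>
    intro a ha d hlen n hn
    by_cases hKa : K ≤ a
    · rw [PySem.List.pyRange_one_eq_nil (by exact_mod_cast hKa)]
      refine ⟨hlen n hn, ?_⟩
      intro i hi
      have hni : ¬ (a ≤ i ∧ pvCharAt s i = n) := fun hh => by omega
      simp [hni]
    · push_neg at hKa
      rw [PySem.List.pyRange_one_cons (by exact_mod_cast hKa), List.foldl_cons]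
      have hlt : a < s.toList.length := by have := hs.1; omega
      have hstep : pvStepA s d (a : Int)
          = d.modify (pvCharAt s a) [] (fun l => l.set a (l.getD a 0 + 1)) := by
        have hchar : s.toList[a] = pvCharAt s a := by
          simp [pvCharAt, List.getD, List.getElem?_eq_getElem hlt]
        simp [pvStepA, PySem.Str.pyGet?, PySem.Chars.pyGet?, PySem.List.pyGet?,
          PySem.List.pyIdx?, List.getD, hchar,
          show a < s.length by rw [← String.length_toList]; exact hlt]
      have hca : pvCharAt s a ∈ (['A', 'C', 'G', 'T'] : List Char) := hs.2 a hKa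
      set d1 := d.modify (pvCharAt s a) [] (fun l => l.set a (l.getD a 0 + 1)) with hd1
      have hlen1 : ∀ n' ∈ (['A', 'C', 'G', 'T'] : List Char), (d1.getD n' []).length = K := by
        intro n' hn'
        rw [hd1, PySem.Dict.getD_modify]
        split_ifs with h
        · rw [List.length_set]; exact hlen _ hca
        · exact hlen n' hn'
      have hcast : ((a : Int) + 1) = ((a + 1 : Nat) : Int) := by push_cast; ring
      rw [hstep, hcast]
      have IH := ih (a + 1) (by omega) d1 hlen1 n hn
      refine ⟨IH.1, ?_⟩
      intro i hi
      rw [IH.2 i hi]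
      have hla : (d.getD (pvCharAt s a) []).length = K := hlen _ hca
      have hcell : (d1.getD n []).getD i 0
          = (d.getD n []).getD i 0 + (if i = a ∧ pvCharAt s a = n then 1 else 0) := by
        rw [hd1, PySem.Dict.getD_modify]
        by_cases h1 : n = pvCharAt s a
        · rw [if_pos h1, h1]
          by_cases h2 : i = a
          · subst h2
            rw [if_pos ⟨rfl, rfl⟩]
            simp [List.getD, List.getElem?_set_self, hla, hi]
          · rw [if_neg (fun hh => h2 hh.1)]
            simp [List.getD, List.getElem?_set_ne (fun hh => h2 hh.symm)]
        · rw [if_neg h1, if_neg (fun hh => h1 hh.2.symm)]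
          simp
      rw [hcell]
      have harith : ((if i = a ∧ pvCharAt s a = n then (1:Int) else 0)
            + (if a + 1 ≤ i ∧ pvCharAt s i = n then 1 else 0))
          = (if a ≤ i ∧ pvCharAt s i = n then 1 else 0) := by
        by_cases hia : i = a
        · subst hia
          have hno : ¬ (i + 1 ≤ i ∧ pvCharAt s i = n) := fun hh => by omega
          by_cases hc : pvCharAt s i = n <;> simp [hc, hno]
        · have h0 : ¬ (i = a ∧ pvCharAt s a = n) := fun hh => hia hh.1
          have he : (a + 1 ≤ i) ↔ (a ≤ i) := by omega
          simp [h0, he]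
      omega

theorem pv_outer (K : Nat) :
    ∀ (Ms : List String), (∀ s ∈ Ms, pvGood K s) →
    ∀ (d : PySem.Dict Char (List Int)),
    (∀ n ∈ (['A', 'C', 'G', 'T'] : List Char), (d.getD n []).length = K) →
    ∀ n ∈ (['A', 'C', 'G', 'T'] : List Char),
      ((Ms.foldl (fun d s => List.foldl (pvStepA s) d (PySem.List.pyRange 0 (K : Int) 1)) d).getD n []).length = K ∧
      ∀ i < K,
        ((Ms.foldl (fun d s => List.foldl (pvStepA s) d (PySem.List.pyRange 0 (K : Int) 1)) d).getD n []).getD i 0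
          = (d.getD n []).getD i 0 + (List.count n (Ms.map (fun s => pvCharAt s i)) : Int) := by
  intro Ms
  induction Ms with
  | nil => intro _ d hlen n hn; refine ⟨hlen n hn, ?_⟩; intro i hi; simp
  | cons s rest ih =>
    intro hgood d hlen n hn
    have hinner := pv_inner' K s (hgood s (by simp)) K 0 (by omega) d hlen
    rw [List.foldl_cons]
    set d1 := List.foldl (pvStepA s) d (PySem.List.pyRange 0 (K : Int) 1) with hd1
    have hd1' : d1 = List.foldl (pvStepA s) d (PySem.List.pyRange ((0 : Nat) : Int) (K : Int) 1) := by
      rw [hd1]; norm_num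
    have hlen1 : ∀ n' ∈ (['A', 'C', 'G', 'T'] : List Char), (d1.getD n' []).length = K := by
      intro n' hn'; rw [hd1']; exact (pv_inner' K s (hgood s (by simp)) K 0 (by omega) d hlen n' hn').1
    have IH := ih (fun t ht => hgood t (by simp [ht])) d1 hlen1 n hn
    refine ⟨IH.1, ?_⟩
    intro i hi
    rw [IH.2 i hi]
    have hc1 : (d1.getD n []).getD i 0
        = (d.getD n []).getD i 0 + (if pvCharAt s i = n then 1 else 0) := by
      rw [hd1']
      have := (pv_inner' K s (hgood s (by simp)) K 0 (by omega) d hlen n hn).2 i hi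
      rw [this]
      congr 1
      simp
    rw [hc1, List.map_cons, List.count_cons]
    by_cases hc : pvCharAt s i = n <;> simp [hc] <;> push_cast <;> ring

-- A's strict-max selection loop equals max? with the same key
theorem pv_sel (cnt : Char → Int) (h : 0 < cnt 'A') :
    (List.foldl (fun (p : Int × List Char) n => if cnt n > p.1 then (cnt n, [n]) else p)
      ((0 : Int), ([] : List Char)) ['A', 'C', 'G', 'T']).2
    = (match PySem.List.max? ['A', 'C', 'G', 'T'] cnt with
      | none => ([] : List Char)
      | some c => [c]) := by
  simp only [PySem.List.max?, List.foldl_cons, List.foldl_nil, gt_iff_lt]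
  rw [if_pos h]
  split_ifs <;> simp_all <;> (try (split_ifs <;> simp_all)) <;> (try (split_ifs <;> simp_all)) <;> omega

-- A's double loop, rephrased as a fold over the motif list itself
theorem pv_outer_general (Ms : List String) (K : Nat) (count0 : PySem.Dict Char (List Int)) :
    List.foldl (fun d character =>
      List.foldl (fun d index =>
        match PySem.List.pyGet? Ms character with
        | none => d
        | some s =>
          match PySem.Str.pyGet? s index with
          | none => d
          | some symbol =>
            d.modify symbol [] (fun l => l.set index.toNat (l.getD index.toNat 0 + 1)))
        d (PySem.List.pyRange 0 (K : Int) 1))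
      count0 (PySem.List.pyRange 0 (Ms.length : Int) 1)
    = Ms.foldl (fun d s => List.foldl (pvStepA s) d (PySem.List.pyRange 0 (K : Int) 1)) count0 := by
  rw [← PySem.List.foldl_pyRange_zero_pyGetD Ms ""
    (fun d s => List.foldl (pvStepA s) d (PySem.List.pyRange 0 (K : Int) 1)) count0]
  have hlen : PySem.List.len Ms = (Ms.length : Int) := by simp [PySem.List.len_eq]
  rw [hlen]
  apply PySem.List.foldl_congr_mem
  intro acc x hx
  obtain ⟨hx0, hxN⟩ := PySem.List.mem_pyRange_one.mp hx
  have hxx : x = (x.toNat : Int) := by omega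
  have hxN' : x.toNat < Ms.length := by omega
  rw [hxx]
  simp only [pv_list_pyGet?_nat Ms x.toNat hxN',
    PySem.List.pyGetD_of_nonneg Ms "" (Int.natCast_nonneg x.toNat), Int.toNat_natCast]
  rfl

-- the per-column value of A's matrix is the pseudocount
theorem pv_colA (m0 : String) (rest : List String)
    (hgood : ∀ s ∈ m0 :: rest, pvGood m0.toList.length s)
    (i : Nat) (hi : i < m0.toList.length) :
    ∀ n ∈ (['A', 'C', 'G', 'T'] : List Char),
      PySem.List.pyGetD (((MotifCountWithPseudocounts (m0 :: rest)).getD n [])) (i : Int) 0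
        = pvColCount (m0 :: rest) i n := by
  intro n hn
  have h0 : PySem.List.pyGet? (m0 :: rest) 0 = some m0 := by
    simpa using pv_list_pyGet?_nat (m0 :: rest) 0 (by simp)
  have hACGT : "ACGT".toList = (['A', 'C', 'G', 'T'] : List Char) := rfl
  simp only [MotifCountWithPseudocounts, h0, hACGT, PySem.Str.len_eq]
  set K := m0.toList.length with hK
  have hones : List.foldl (fun l (_ : Int) => l ++ [(1 : Int)]) []
      (PySem.List.pyRange 0 (K : Int) 1) = List.replicate K (1 : Int) := by
    have h := PySem.List.foldl_append_singleton_eq_map (fun (_ : Int) => (1 : Int))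
      (PySem.List.pyRange 0 (K : Int) 1) []
    simpa [PySem.List.length_pyRange_one] using h
  rw [hones, pv_outer_general]
  have hlen0 : ∀ n' ∈ (['A', 'C', 'G', 'T'] : List Char),
      ((List.foldl (fun (d : PySem.Dict Char (List Int)) c => d.insert c (List.replicate K (1 : Int)))
        PySem.Dict.empty ['A', 'C', 'G', 'T']).getD n' []).length = K := by
    intro n' hn'
    rw [pv_init _ _ _ hn', List.length_replicate]
  have hcell := (pv_outer K (m0 :: rest) hgood _ hlen0 n hn).2 i hi
  rw [PySem.List.pyGetD_natCast, hcell, pv_init _ _ _ hn]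
  have hrep : (List.replicate K (1 : Int)).getD i 0 = 1 := by
    simp [List.getD, List.getElem?_replicate, hi]
  rw [hrep]
  rfl

-- B's inner loop: the tally after scanning all motifs holds the four plain column counts
theorem pv_tally (K j : Nat) (hj : j < K) :
    ∀ (Ms : List String), (∀ s ∈ Ms, pvGood K s) → ∀ (a c g t : Int),
    List.foldl (fun (tally : List Int) m =>
        match PySem.Str.pyGet? m (j : Int) with
        | none => tally
        | some ch =>
          match PySem.List.index? (['A', 'C', 'G', 'T'] : List Char) ch with
          | none => tally
          | some i => tally.set i (tally.getD i 0 + 1))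
      [a, c, g, t] Ms
    = [a + pvCnt Ms j 'A', c + pvCnt Ms j 'C', g + pvCnt Ms j 'G', t + pvCnt Ms j 'T'] := by
  intro Ms
  induction Ms with
  | nil => intro _ a c g t; simp [pvCnt]
  | cons s rest ih =>
    intro hgood a c g t
    rw [List.foldl_cons]
    have hjs : j < s.toList.length := lt_of_lt_of_le hj (hgood s (by simp)).1
    rw [pv_str_pyGet?_nat s j hjs]
    have hch := (hgood s (by simp)).2 j hj
    have hrest : ∀ x ∈ rest, pvGood K x := fun x hx => hgood x (by simp [hx])
    simp only [List.mem_cons, List.mem_singleton, List.not_mem_nil, or_false] at hch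
    rcases hch with h | h | h | h <;> rw [h] <;>
      simp only [show PySem.List.index? ['A', 'C', 'G', 'T'] 'A' = some 0 from by decide,
        show PySem.List.index? ['A', 'C', 'G', 'T'] 'C' = some 1 from by decide,
        show PySem.List.index? ['A', 'C', 'G', 'T'] 'G' = some 2 from by decide,
        show PySem.List.index? ['A', 'C', 'G', 'T'] 'T' = some 3 from by decide,
        List.set_cons_zero, List.set_cons_succ, List.getD_cons_zero, List.getD_cons_succ] <;>
      rw [ih hrest] <;>
      simp [pvCnt, List.count_cons, h] <;>
      push_cast <;> ring_nf <;> omega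

-- the per-column pick: B's max(tally)+index on plain counts = A's first strict max on pseudocounts
theorem pv_pick4 (a c g t : Int) (res : List Char) (k : Char → Int)
    (hA : k 'A' = 1 + a) (hC : k 'C' = 1 + c) (hG : k 'G' = 1 + g) (hT : k 'T' = 1 + t) :
    (match PySem.List.max? [a, c, g, t] (fun x => x) with
     | none => res
     | some mx =>
       match PySem.List.index? [a, c, g, t] mx with
       | none => res
       | some i =>
         match PySem.Str.pyGet? "ACGT" (i : Int) with
         | none => res
         | some ch => res ++ [ch])
    = (match PySem.List.max? (['A', 'C', 'G', 'T'] : List Char) k with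
       | none => res
       | some ch => res ++ [ch]) := by
  simp only [PySem.List.max?, PySem.List.index?, List.foldl_cons, List.foldl_nil, hA, hC, hG, hT,
    List.idxOf?, List.findIdx?]
  split_ifs <;> simp_all [List.findIdx?.go, beq_iff_eq] <;> (try split_ifs) <;> (try simp_all) <;>
    (try split_ifs) <;> (try simp_all) <;> (try split_ifs) <;> (try simp_all) <;>
    (try split_ifs) <;> (try simp_all) <;> try omega

theorem pv_main (Motifs : List String) (hPre : Pre_MotifConsensus Motifs) :
    MotifConsensus Motifs = MotifConsensus_alt Motifs := by
  obtain ⟨hne, hgd⟩ := hPre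
  obtain ⟨m0, rest, rfl⟩ : ∃ m0 rest, Motifs = m0 :: rest := by
    cases Motifs with
    | nil => exact absurd rfl hne
    | cons a l => exact ⟨a, l, rfl⟩
  have hgood : ∀ s ∈ m0 :: rest, pvGood m0.toList.length s := by
    intro s hs
    exact ⟨(hgd s hs).1, fun i hi => (hgd s hs).2 i hi⟩
  have h0 : PySem.List.pyGet? (m0 :: rest) 0 = some m0 := by
    simpa using pv_list_pyGet?_nat (m0 :: rest) 0 (by simp)
  have hACGT : "ACGT".toList = (['A', 'C', 'G', 'T'] : List Char) := rfl
  set K := m0.toList.length with hK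
  simp only [MotifConsensus, MotifConsensus_alt, h0, hACGT, PySem.Str.len_eq]
  congr 1
  rw [← hK, PySem.List.pyRange_zero_natCast K, List.foldl_map, List.foldl_map]
  apply PySem.List.foldl_congr_mem
  intro acc j hj
  have hjK : j < K := List.mem_range.mp hj
  -- A side: selection over the matrix column = selection over pvColCount
  have hcA := pv_colA m0 rest hgood j hjK
  have hselA : List.foldl (fun (p : Int × List Char) nucleotide =>
        if PySem.List.pyGetD (((MotifCountWithPseudocounts (m0 :: rest)).getD nucleotide [])) (j : Int) 0 > p.1 then
          (PySem.List.pyGetD (((MotifCountWithPseudocounts (m0 :: rest)).getD nucleotide [])) (j : Int) 0, [nucleotide])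
        else p)
      ((0 : Int), ([] : List Char)) ['A', 'C', 'G', 'T']
      = List.foldl (fun (p : Int × List Char) nucleotide =>
        if pvColCount (m0 :: rest) j nucleotide > p.1 then
          (pvColCount (m0 :: rest) j nucleotide, [nucleotide])
        else p)
      ((0 : Int), ([] : List Char)) ['A', 'C', 'G', 'T'] := by
    apply PySem.List.foldl_congr_mem
    intro p nc hnc
    rw [hcA nc hnc]
  have hpos : 0 < pvColCount (m0 :: rest) j 'A' := by
    have : (0 : Int) ≤ pvCnt (m0 :: rest) j 'A' := Int.natCast_nonneg _
    unfold pvColCount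
    omega
  -- B side: the tally is the four plain column counts
  rw [hselA, pv_sel _ hpos, pv_tally K j hjK (m0 :: rest) hgood 0 0 0 0]
  simp only [zero_add]
  rw [pv_pick4 (pvCnt (m0 :: rest) j 'A') (pvCnt (m0 :: rest) j 'C')
        (pvCnt (m0 :: rest) j 'G') (pvCnt (m0 :: rest) j 'T') acc
        (pvColCount (m0 :: rest) j) rfl rfl rfl rfl]
  cases PySem.List.max? (['A', 'C', 'G', 'T'] : List Char) (pvColCount (m0 :: rest) j) <;> simp

-- ===== VERDICT (by name: the statement is the Claim_ definition above) =====
theorem MotifConsensus_spec : Claim_equal_MotifConsensus := by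
  intro Motifs _ hPre
  unfold Spec_MotifConsensus
  exact pv_main Motifs hPre
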